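-- pv_equiv track=rewrite | github.com/alvarogarinf/Securing-Apache-Servers-using-DSL | lexer.py | predict_first_term
-- ===== SOURCE A (Python) =====
-- def predict_first_term(list, term):
--     """It will predict which first term does the user tries to refer when making an error
--
--     Parameters:
--     list (list): List of possible terms
--     term (int): Description of arg1
--
--     Returns:
--     String: Word predicted
--
--     @author: Álvaro García Infante
--    """
--     prediction = list
--     temp = []
--     detected_items_in_the_loop = False
--     detected_items_in_this_round = False
--     for i in range(0, len(term)):
--         b = term.lower()[i:i + 1]
--         for item in prediction:
--             a = item.lower()[i:i + 1]
--             if a == b: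
--                 detected_items_in_this_round = True
--                 detected_items_in_the_loop = True
--                 temp.append(item)
--         if detected_items_in_this_round:
--             prediction = temp
--         else:
--             break;
--         detected_items_in_this_round = False
--         temp = []
--
--     if len(prediction) > 0 and detected_items_in_the_loop:
--         return prediction[0]
--     else:
--         return ""
-- ===== SOURCE B (Python) =====
-- def predict_first_term(list, term):
--     """Single row-wise pass: pick the first item with the longest
--     case-insensitive common prefix with term (empty string if none match)."""
--     t = term.lower()
--     best = ""
--     best_len = 0
--     for item in list:
--         low = item.lower()
--         k = 0
--         while k < len(t) and k < len(low) and low[k] == t[k]: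
--             k += 1
--         if k > best_len:
--             best = item
--             best_len = k
--     return best if best_len >= 1 else ""
-- ===== Notes on version B (the rewrite author's own statement) =====
-- stated objective: simpler
-- what changed: Replaced A's progressive candidate-list narrowing (one filtering pass over the surviving candidates per character of term, with temp/flag bookkeeping and a break) by a single row-wise pass that computes each item's case-insensitive common-prefix length with term and keeps the first item achieving the strict maximum, returning '' when no item matches even one character.
import Mathlib
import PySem

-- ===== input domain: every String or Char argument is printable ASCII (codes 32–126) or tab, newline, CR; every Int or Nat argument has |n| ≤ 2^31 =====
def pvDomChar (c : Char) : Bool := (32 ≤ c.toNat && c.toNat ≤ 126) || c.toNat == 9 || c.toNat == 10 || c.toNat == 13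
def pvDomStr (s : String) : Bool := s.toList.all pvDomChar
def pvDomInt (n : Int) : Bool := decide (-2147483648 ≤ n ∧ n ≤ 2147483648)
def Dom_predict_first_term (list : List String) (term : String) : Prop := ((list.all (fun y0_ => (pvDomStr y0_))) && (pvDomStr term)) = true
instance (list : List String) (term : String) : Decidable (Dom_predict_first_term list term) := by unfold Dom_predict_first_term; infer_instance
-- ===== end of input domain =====

-- B replaces A's progressive candidate-list narrowing (one filtering pass per character of term)
-- with a single row-wise pass keeping the first item of maximal case-insensitive common-prefix
-- length with term (objective: simpler).

-- ===== PORT A =====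
-- outer 'for i in range(0, len(term))' with break, carrying (prediction, detected_items_in_the_loop)
def ptA_loop (term : String) : List Int → List String → Bool → List String × Bool
  | [], prediction, detLoop => (prediction, detLoop)
  | i :: rest, prediction, detLoop =>
    let b := PySem.Str.slice (PySem.Str.lower term) (some i) (some (i + 1))
    -- inner 'for item in prediction', state (temp, detected_this_round, detected_in_the_loop)
    let st := prediction.foldl
      (fun (st : List String × Bool × Bool) item =>
        let a := PySem.Str.slice (PySem.Str.lower item) (some i) (some (i + 1))
        if a = b then (st.1 ++ [item], true, true) else st)
      ([], false, detLoop)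
    if st.2.1 then ptA_loop term rest st.1 st.2.2
    else (prediction, detLoop)

def predict_first_term (list : List String) (term : String) : String :=
  let r := ptA_loop term (PySem.List.pyRange 0 (PySem.Str.len term) 1) list false
  if r.1.length > 0 && r.2 then
    match PySem.List.pyGet? r.1 0 with
    | some s => s
    | none => ""          -- unreachable: guarded by length > 0
  else ""

-- ===== PORT B =====
-- B's 'while k < len(t) and k < len(low) and low[k] == t[k]: k += 1' as structural recursion
def ptB_cpl : List Char → List Char → Nat
  | a :: as, b :: bs => if a = b then ptB_cpl as bs + 1 else 0
  | _, _ => 0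

def predict_first_term_alt (list : List String) (term : String) : String :=
  let t := (PySem.Str.lower term).toList
  let r := list.foldl
    (fun (acc : String × Nat) item =>
      let k := ptB_cpl ((PySem.Str.lower item).toList) t
      if k > acc.2 then (item, k) else acc)
    ("", 0)
  if r.2 ≥ 1 then r.1 else ""

-- ===== PRECONDITION & SPEC =====
def Spec_predict_first_term (list : List String) (term : String) (out : String) : Prop := out = predict_first_term_alt list term
instance (list : List String) (term : String) (out : String) : Decidable (Spec_predict_first_term list term out) := by unfold Spec_predict_first_term; infer_instance

-- ===== CLAIM (what is proved, stated in full; the proofs are below) =====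
def Claim_equal_predict_first_term : Prop := ∀ (list : List String) (term : String), Dom_predict_first_term list term → Spec_predict_first_term list term (predict_first_term list term)

-- ===== LEMMAS AND PROOFS =====

-- case-insensitive common-prefix length of one item with t (= lowered term)
def kf (t : List Char) (item : String) : Nat := ptB_cpl (PySem.Chars.lower item.toList) t

-- maximum of kf over a list of items
def maxkf (t : List Char) : List String → Nat
  | [] => 0
  | x :: xs => max (kf t x) (maxkf t xs)

theorem cpl_le_right (l t : List Char) : ptB_cpl l t ≤ t.length := by
  induction l generalizing t with
  | nil => cases t <;> simp [ptB_cpl]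
  | cons a as ih =>
    cases t with
    | nil => simp [ptB_cpl]
    | cons b bs =>
      simp only [ptB_cpl]
      split
      · simpa using ih bs
      · simp

-- the character test at position i, for an item already matching i characters
theorem cpl_step (l t : List Char) (i : Nat) (hle : i ≤ ptB_cpl l t) (hi : i < t.length) :
    ((l.drop i).take 1 = (t.drop i).take 1) ↔ i + 1 ≤ ptB_cpl l t := by
  induction i generalizing l t with
  | zero =>
    cases t with
    | nil => simp at hi
    | cons b bs =>
      cases l with
      | nil => simp [ptB_cpl]
      | cons a as =>
        simp only [List.drop_zero, List.take, ptB_cpl]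
        constructor
        · intro h
          simp only [List.cons.injEq] at h
          simp [h.1]
        · intro h
          split at h
          · simp_all
          · omega
  | succ j ih =>
    cases t with
    | nil => simp at hi
    | cons b bs =>
      cases l with
      | nil => simp [ptB_cpl] at hle
      | cons a as =>
        simp only [ptB_cpl] at hle ⊢
        split at hle
        · rename_i hab
          simp only [List.drop_succ_cons]
          rw [ih as bs (by omega) (by simpa using hi)]
          constructor
          · intro h; simp [hab]; omega
          · intro h
            split at h
            · omega
            · omega
        · omega

theorem maxkf_le (t : List Char) (l : List String) : maxkf t l ≤ t.length := by
  induction l with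
  | nil => simp [maxkf]
  | cons x xs ih => simp only [maxkf]; exact max_le (cpl_le_right _ _) ih

theorem le_maxkf_iff (t : List Char) (l : List String) (j : Nat) (hj : 0 < j) :
    (j ≤ maxkf t l) ↔ l.any (fun it => decide (j ≤ kf t it)) = true := by
  induction l with
  | nil => simp [maxkf]; omega
  | cons x xs ih => simp only [maxkf, List.any_cons, ← ih, le_max_iff, Bool.or_eq_true, decide_eq_true_eq]

theorem exists_argmax (t : List Char) (l : List String) (h : 0 < maxkf t l) :
    ∃ it ∈ l, kf t it = maxkf t l := by
  induction l with
  | nil => simp [maxkf] at h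
  | cons x xs ih =>
    simp only [maxkf] at h ⊢
    rcases Nat.lt_or_ge (kf t x) (maxkf t xs) with hc | hc
    · obtain ⟨it, hm, he⟩ := ih (by omega)
      exact ⟨it, by simp [hm], by omega⟩
    · exact ⟨x, by simp, by omega⟩

-- A's inner loop as filter / any
theorem innerA_fold (q : String → Bool) (pred : List String) (temp : List String) (dr dl : Bool)
    (f : List String × Bool × Bool → String → List String × Bool × Bool)
    (hf : ∀ st item, f st item = if q item then (st.1 ++ [item], true, true) else st) :
    pred.foldl f (temp, dr, dl) = (temp ++ pred.filter q, dr || pred.any q, dl || pred.any q) := by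
  induction pred generalizing temp dr dl with
  | nil => simp
  | cons x xs ih =>
    simp only [List.foldl_cons, hf, List.filter_cons, List.any_cons]
    by_cases hx : q x
    · simp only [hx, if_true]
      rw [ih]
      simp
    · simp only [hx, Bool.false_eq_true, if_false]
      rw [ih]
      simp

-- A's slice comparison at position i equals the prefix-extension test
theorem slice_test (item term : String) (i : Nat)
    (hle : i ≤ kf (PySem.Chars.lower term.toList) item)
    (hi : i < (PySem.Chars.lower term.toList).length) :
    (PySem.Str.slice (PySem.Str.lower item) (some (i : Int)) (some ((i : Int) + 1))
      = PySem.Str.slice (PySem.Str.lower term) (some (i : Int)) (some ((i : Int) + 1)))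
    ↔ i + 1 ≤ kf (PySem.Chars.lower term.toList) item := by
  rw [String.ext_iff, PySem.Str.toList_slice, PySem.Str.toList_slice,
      PySem.Chars.slice_eq_listSlice, PySem.Chars.slice_eq_listSlice,
      PySem.Str.toList_lower, PySem.Str.toList_lower]
  have hc : (i : Int) + 1 = (i : Int) + ((1 : Nat) : Int) := by push_cast; ring
  rw [hc, PySem.List.slice_natCast_add, PySem.List.slice_natCast_add]
  exact cpl_step _ _ i hle hi

-- A's outer loop, from round i on, computes the items of maximal prefix length
theorem loopA (term : String) (list : List String) (fuel : Nat) (i : Nat)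
    (hfuel : (PySem.Chars.lower term.toList).length - i ≤ fuel)
    (hn : i ≤ (PySem.Chars.lower term.toList).length)
    (hm : i ≤ maxkf (PySem.Chars.lower term.toList) list) :
    ptA_loop term (PySem.List.pyRange (i : Int) ((PySem.Chars.lower term.toList).length : Int) 1)
      (list.filter (fun it => decide (i ≤ kf (PySem.Chars.lower term.toList) it))) (decide (0 < i))
    = (list.filter (fun it => decide (maxkf (PySem.Chars.lower term.toList) list ≤ kf (PySem.Chars.lower term.toList) it)),
       decide (0 < maxkf (PySem.Chars.lower term.toList) list)) := by
  set t := PySem.Chars.lower term.toList with ht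
  set m := maxkf t list with hmm
  induction fuel generalizing i with
  | zero =>
    have hin : i = t.length := by omega
    have him : m = i := by have := maxkf_le t list; omega
    have hr : PySem.List.pyRange (i : Int) (t.length : Int) 1 = [] := by
      simp [PySem.List.pyRange, hin]
    rw [hr, him]
    simp [ptA_loop]
  | succ f ih =>
    rcases Nat.eq_or_lt_of_le hn with hin | hin
    · have him : m = i := by have := maxkf_le t list; omega
      have hr : PySem.List.pyRange (i : Int) (t.length : Int) 1 = [] := by
        simp [PySem.List.pyRange, hin]
      rw [hr, him]
      simp [ptA_loop]
    · rw [PySem.List.pyRange_one_cons (by exact_mod_cast hin)]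
      simp only [ptA_loop]
      rw [innerA_fold (fun item => decide (PySem.Str.slice (PySem.Str.lower item) (some (i : Int)) (some ((i : Int) + 1))
            = PySem.Str.slice (PySem.Str.lower term) (some (i : Int)) (some ((i : Int) + 1))))
          _ _ _ _ _ (fun st item => by simp)]
      have hfc : (list.filter (fun it => decide (i ≤ kf t it))).filter
            (fun item => decide (PySem.Str.slice (PySem.Str.lower item) (some (i : Int)) (some ((i : Int) + 1))
              = PySem.Str.slice (PySem.Str.lower term) (some (i : Int)) (some ((i : Int) + 1))))
          = list.filter (fun it => decide (i + 1 ≤ kf t it)) := by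
        rw [List.filter_congr (q := fun it => decide (i + 1 ≤ kf t it))
            (fun x hx => by
              have hxk : i ≤ kf t x := by simpa using (List.mem_filter.mp hx).2
              simp only [decide_eq_decide]
              exact slice_test x term i hxk hin)]
        rw [List.filter_filter]
        exact List.filter_congr (fun x _ => by
          by_cases h : i + 1 ≤ kf t x
          · simp [h, Nat.le_of_succ_le h]
          · simp [h])
      rw [hfc]
      have hany : (list.filter (fun it => decide (i ≤ kf t it))).any
            (fun item => decide (PySem.Str.slice (PySem.Str.lower item) (some (i : Int)) (some ((i : Int) + 1))
              = PySem.Str.slice (PySem.Str.lower term) (some (i : Int)) (some ((i : Int) + 1))))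
          = decide (i + 1 ≤ m) := by
        rw [Bool.eq_iff_iff]
        rw [List.any_eq_true]
        constructor
        · rintro ⟨x, hx, hq⟩
          have hxk : i ≤ kf t x := by simpa using (List.mem_filter.mp hx).2
          have := (slice_test x term i hxk hin).mp (by simpa using hq)
          simp only [decide_eq_true_eq]
          rw [hmm, le_maxkf_iff t list (i+1) (by omega)]
          exact List.any_eq_true.mpr ⟨x, (List.mem_filter.mp hx).1, by simpa using this⟩
        · intro hle
          simp only [decide_eq_true_eq] at hle
          rw [hmm, le_maxkf_iff t list (i+1) (by omega)] at hle
          obtain ⟨x, hx, hq⟩ := List.any_eq_true.mp hle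
          have hxk1 : i + 1 ≤ kf t x := by simpa using hq
          refine ⟨x, List.mem_filter.mpr ⟨hx, by
            simp only [decide_eq_true_eq]
            exact Nat.le_of_succ_le hxk1⟩, ?_⟩
          simpa using (slice_test x term i (Nat.le_of_succ_le hxk1) hin).mpr hxk1
      rw [hany]
      by_cases hnext : i + 1 ≤ m
      · simp only [hnext, decide_true, Bool.or_true, if_true]
        have := ih (i + 1) (by omega) (by omega) (by omega)
        have hcast : (i : Int) + 1 = ((i + 1 : Nat) : Int) := by push_cast; ring
        rw [hcast]
        simpa using this
      · have him : m = i := by omega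
        simp only [hnext, decide_false, Bool.or_false]
        rw [him]
        simp

-- B's fold keeps the first item of maximal prefix length (strict-improvement invariant)
theorem foldB (t : List Char) (l : List String) (best : String) (blen : Nat) :
    l.foldl (fun (acc : String × Nat) item =>
        let k := ptB_cpl (PySem.Chars.lower item.toList) t
        if k > acc.2 then (item, k) else acc) (best, blen)
    = if blen < maxkf t l
      then ((l.filter (fun it => decide (maxkf t l ≤ kf t it))).headD best, maxkf t l)
      else (best, blen) := by
  induction l generalizing best blen with
  | nil => simp [maxkf]
  | cons x xs ih =>
    simp only [List.foldl_cons, maxkf, List.filter_cons]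
    have hkx : ptB_cpl (PySem.Chars.lower x.toList) t = kf t x := rfl
    simp only [hkx]
    by_cases hx : kf t x > blen
    · simp only [hx, if_true]
      rw [ih]
      by_cases h2 : kf t x < maxkf t xs
      · have hmax : max (kf t x) (maxkf t xs) = maxkf t xs := by omega
        simp only [hmax, if_pos h2, if_pos (show blen < maxkf t xs by omega)]
        rw [if_neg (by simp only [decide_eq_true_eq]; omega)]
        obtain ⟨it, hm, he⟩ := exists_argmax t xs (by omega)
        have hne : xs.filter (fun it => decide (maxkf t xs ≤ kf t it)) ≠ [] := by
          intro hemp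
          have hmem : it ∈ xs.filter (fun it => decide (maxkf t xs ≤ kf t it)) :=
            List.mem_filter.mpr ⟨hm, by simp [he]⟩
          rw [hemp] at hmem; simp at hmem
        cases hfil : xs.filter (fun it => decide (maxkf t xs ≤ kf t it)) with
        | nil => exact absurd hfil hne
        | cons y ys => simp
      · have hmax : max (kf t x) (maxkf t xs) = kf t x := by omega
        simp only [hmax, if_neg h2, if_pos hx]
        rw [if_pos (by simp)]
        simp
    · simp only [hx, if_false]
      rw [ih]
      by_cases h2 : blen < maxkf t xs
      · have hmax : max (kf t x) (maxkf t xs) = maxkf t xs := by omega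
        simp only [hmax, if_pos h2]
        rw [if_neg (by simp only [decide_eq_true_eq]; omega)]
      · have hm2 : ¬ blen < max (kf t x) (maxkf t xs) := by omega
        simp only [if_neg h2, if_neg hm2]

theorem ptAB_eq (list : List String) (term : String) :
    predict_first_term list term = predict_first_term_alt list term := by
  unfold predict_first_term predict_first_term_alt
  simp only [PySem.Str.toList_lower]
  have hA := loopA term list ((PySem.Chars.lower term.toList).length) 0 (by omega) (by omega) (by omega)
  simp only [Nat.cast_zero, Nat.zero_le, decide_true, List.filter_true, Nat.lt_irrefl,
    decide_false] at hA
  have hlen : PySem.Str.len term = (((PySem.Chars.lower term.toList).length : Nat) : Int) := by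
    rw [PySem.Str.len_eq]; simp [PySem.Chars.lower]
  rw [hlen, hA, foldB]
  by_cases hm : 0 < maxkf (PySem.Chars.lower term.toList) list
  · simp only [hm, decide_true, Bool.and_true]
    obtain ⟨it, hmem, heq⟩ := exists_argmax _ _ hm
    have hne : list.filter (fun it => decide (maxkf (PySem.Chars.lower term.toList) list ≤ kf (PySem.Chars.lower term.toList) it)) ≠ [] := by
      intro hemp
      have hmemf : it ∈ list.filter (fun it => decide (maxkf (PySem.Chars.lower term.toList) list ≤ kf (PySem.Chars.lower term.toList) it)) :=
        List.mem_filter.mpr ⟨hmem, by simp [heq]⟩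
      rw [hemp] at hmemf; simp at hmemf
    cases hfil : list.filter (fun it => decide (maxkf (PySem.Chars.lower term.toList) list ≤ kf (PySem.Chars.lower term.toList) it)) with
    | nil => exact absurd hfil hne
    | cons y ys =>
      simp only [PySem.List.pyGet?, PySem.List.pyIdx?]
      norm_num
      intro h0
      omega
  · simp [hm]

-- ===== VERDICT (by name: the statement is the Claim_ definition above) =====
theorem predict_first_term_spec : Claim_equal_predict_first_term := by
  intro list term _
  unfold Spec_predict_first_term
  exact ptAB_eq list term
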